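-- pv_equiv track=rewrite | github.com/pypi-data/pypi-mirror-278 | packages/pnu-libgh/pnu_libgh-0.9.5-py3-none-any.whl/libgh/libpnu2.py | _count_from
-- ===== SOURCE A (Python) =====
-- def _count_from(current_time, requests_times):
--     """ Returns the number of requests made in the last day, hour and minute """
--     last_day = 0
--     last_hour = 0
--     last_minute = 0
--
--     one_day = 24 * 60 * 60 # seconds
--     one_hour = 60 * 60 # seconds
--     one_minute = 60 # seconds
--
--     # The requests_times is not necessarily ordered by ascending timestamps...
--     for request_time in requests_times:
--         time_diff = current_time - request_time
--         if time_diff <= one_day: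
--             last_day += 1
--         if time_diff <= one_hour:
--             last_hour += 1
--         if time_diff <= one_minute:
--             last_minute += 1
--
--     return last_day, last_hour, last_minute
-- ===== SOURCE B (Python) =====
-- def _count_from(current_time, requests_times):
--     """ Returns the number of requests made in the last day, hour and minute """
--     within_day = [t for t in requests_times if current_time - t <= 24 * 60 * 60]
--     within_hour = [t for t in within_day if current_time - t <= 60 * 60]
--     within_minute = [t for t in within_hour if current_time - t <= 60]
--     return len(within_day), len(within_hour), len(within_minute)
-- ===== Notes on version B (the rewrite author's own statement) =====
-- stated objective: simpler
-- what changed: Replaces the single loop with three mutable counters and three comparisons per element by progressive filtering: keep the last-day requests, filter those down to last-hour, then last-minute, and return the three lengths.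
import Mathlib
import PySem

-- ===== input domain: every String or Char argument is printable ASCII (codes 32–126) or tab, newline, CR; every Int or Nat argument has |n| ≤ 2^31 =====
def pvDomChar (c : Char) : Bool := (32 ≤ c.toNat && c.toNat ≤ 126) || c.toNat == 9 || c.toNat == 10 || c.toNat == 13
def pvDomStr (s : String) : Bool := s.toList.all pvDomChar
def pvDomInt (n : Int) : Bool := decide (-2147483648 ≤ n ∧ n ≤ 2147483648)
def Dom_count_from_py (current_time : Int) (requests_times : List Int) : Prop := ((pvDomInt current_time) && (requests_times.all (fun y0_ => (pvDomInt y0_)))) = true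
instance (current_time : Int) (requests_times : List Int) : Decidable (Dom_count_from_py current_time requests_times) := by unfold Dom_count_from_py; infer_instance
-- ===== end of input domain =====

-- B replaces A's single loop with three mutable counters by progressive filtering (day ⊇ hour ⊇ minute) and returns the three lengths: a simpler decomposition, same O(n) cost.


-- ===== PORT A =====
def count_from_py (current_time : Int) (requests_times : List Int) : Int × Int × Int :=
  requests_times.foldl
    (fun (s : Int × Int × Int) request_time =>
      let time_diff := current_time - request_time
      let last_day := if time_diff ≤ 24 * 60 * 60 then s.1 + 1 else s.1
      let last_hour := if time_diff ≤ 60 * 60 then s.2.1 + 1 else s.2.1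
      let last_minute := if time_diff ≤ 60 then s.2.2 + 1 else s.2.2
      (last_day, last_hour, last_minute))
    (0, 0, 0)

-- ===== PORT B =====
def count_from_py_alt (current_time : Int) (requests_times : List Int) : Int × Int × Int :=
  let within_day := requests_times.filter (fun t => current_time - t ≤ 24 * 60 * 60)
  let within_hour := within_day.filter (fun t => current_time - t ≤ 60 * 60)
  let within_minute := within_hour.filter (fun t => current_time - t ≤ 60)
  ((within_day.length : Int), (within_hour.length : Int), (within_minute.length : Int))

-- ===== PRECONDITION & SPEC =====
def Spec_count_from_py (current_time : Int) (requests_times : List Int) (out : Int × Int × Int) : Prop := out = count_from_py_alt current_time requests_times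
instance (current_time : Int) (requests_times : List Int) (out : Int × Int × Int) : Decidable (Spec_count_from_py current_time requests_times out) := by unfold Spec_count_from_py; infer_instance

-- ===== CLAIM (what is proved, stated in full; the proofs are below) =====
def Claim_equal_count_from_py : Prop := ∀ (current_time : Int) (requests_times : List Int), Dom_count_from_py current_time requests_times → Spec_count_from_py current_time requests_times (count_from_py current_time requests_times)

-- ===== LEMMAS AND PROOFS =====

-- A's fold, started from any state, adds the three per-predicate counts.
theorem count_from_fold (current_time : Int) (rs : List Int) (d h m : Int) :
    rs.foldl
      (fun (s : Int × Int × Int) request_time =>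
        let time_diff := current_time - request_time
        let last_day := if time_diff ≤ 24 * 60 * 60 then s.1 + 1 else s.1
        let last_hour := if time_diff ≤ 60 * 60 then s.2.1 + 1 else s.2.1
        let last_minute := if time_diff ≤ 60 then s.2.2 + 1 else s.2.2
        (last_day, last_hour, last_minute))
      (d, h, m)
    = (d + (rs.countP (fun t => current_time - t ≤ 24 * 60 * 60) : Int),
       h + (rs.countP (fun t => current_time - t ≤ 60 * 60) : Int),
       m + (rs.countP (fun t => current_time - t ≤ 60) : Int)) := by
  induction rs generalizing d h m with
  | nil => simp
  | cons x xs ih =>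
    simp only [List.foldl_cons, List.countP_cons, ih]
    by_cases h1 : current_time - x ≤ 24 * 60 * 60 <;>
      by_cases h2 : current_time - x ≤ 60 * 60 <;>
        by_cases h3 : current_time - x ≤ 60 <;>
          simp [h1, h2, h3, Prod.ext_iff] <;> omega


-- ===== VERDICT (by name: the statement is the Claim_ definition above) =====
theorem count_from_py_spec : Claim_equal_count_from_py := by
  intro current_time rs _
  show count_from_py current_time rs = count_from_py_alt current_time rs
  unfold count_from_py count_from_py_alt
  rw [count_from_fold]
  simp only [List.countP_filter, ← List.countP_eq_length_filter, zero_add]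
  refine Prod.ext rfl (Prod.ext ?_ ?_) <;> simp only []
  · congr 1
    apply List.countP_congr
    intro t _
    simp only [Bool.and_eq_true, decide_eq_true_eq]
    omega
  · congr 1
    apply List.countP_congr
    intro t _
    simp only [Bool.and_eq_true, decide_eq_true_eq]
    omega
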